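-- pv_equiv track=rewrite | github.com/miraclehand/UNeed | commons/utils/parser.py | compare_key
-- ===== SOURCE A (Python) =====
-- def compare_key(text, key):
--     key = key.strip()
--     if key.__len__() < 1:
--         return True
--
--     text = text.strip()
--     if key[0] != text[0]:
--         return False
--
--     return compare_key(text[1:], key[1:])
-- ===== SOURCE B (Python) =====
-- def compare_key(text, key):
--     ts = ''.join(c for c in text if not c.isspace())
--     ks = ''.join(c for c in key if not c.isspace())
--     return ts.startswith(ks)
-- ===== Notes on version B (the rewrite author's own statement) =====
-- stated objective: faster
-- what changed: Replaces A's strip-and-recurse (re-stripping and re-slicing both strings at every character, O(n^2)) with a single whitespace-removal pass over each string followed by one startswith test.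
-- crash fix: A raises IndexError whenever the whitespace-free text is a strict prefix of the whitespace-free key (e.g. ('a','ab')); B returns False there. — e.g. on compare_key("a", "ab"): A raises IndexError, B returns false
import Mathlib
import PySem

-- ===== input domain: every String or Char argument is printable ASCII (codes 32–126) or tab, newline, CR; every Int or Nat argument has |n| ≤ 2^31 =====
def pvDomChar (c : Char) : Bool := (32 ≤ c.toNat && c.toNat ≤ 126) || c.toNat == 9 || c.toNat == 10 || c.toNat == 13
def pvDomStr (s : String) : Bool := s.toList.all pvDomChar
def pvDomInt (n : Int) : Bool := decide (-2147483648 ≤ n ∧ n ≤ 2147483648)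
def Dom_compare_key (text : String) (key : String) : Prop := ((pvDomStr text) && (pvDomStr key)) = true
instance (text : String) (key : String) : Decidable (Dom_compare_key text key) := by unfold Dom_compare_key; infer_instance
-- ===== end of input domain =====

-- B (faster, O(n) vs A's O(n^2) re-strip/re-slice recursion): remove all whitespace from both strings once, then a
-- single startswith test (same value everywhere A returns; where A raises IndexError, B returns False).

-- ===== PORT A =====
-- A's recursion, on the char lists of the strings. 'key[0]'/'key[1:]' on the stripped
-- nonempty key are its head/tail; when the stripped text is empty, Python's text[0]
-- raises IndexError — that input is excluded by Pre_ (the port returns false there).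
def compareKeyAux (t k : List Char) : Bool :=
  match hstripk : PySem.Chars.strip k with
  | [] => true                      -- len(key) < 1 after strip
  | kc :: kr =>
    match PySem.Chars.strip t with
    | [] => false                   -- Python raises IndexError here (outside Pre_)
    | tc :: tr =>
      if kc ≠ tc then false
      else compareKeyAux tr kr
termination_by k.length
decreasing_by
  have h1 : (PySem.Chars.strip k).length ≤ k.length := by
    simp only [PySem.Chars.strip, PySem.Chars.rstrip, PySem.Chars.lstrip, List.length_reverse]
    calc (List.dropWhile PySem.Chars.isspace (List.dropWhile PySem.Chars.isspace k).reverse).length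
        ≤ (List.dropWhile PySem.Chars.isspace k).reverse.length := List.length_dropWhile_le _ _
      _ ≤ k.length := by simpa using List.length_dropWhile_le PySem.Chars.isspace k
  have h2 : kr.length + 1 = (PySem.Chars.strip k).length := by rw [hstripk]; simp
  omega

def compare_key (text : String) (key : String) : Bool :=
  compareKeyAux text.toList key.toList

-- ===== PORT B =====
-- Source B: ''.join(c for c in s if not c.isspace()) is the filter of the char list; then startswith.
def compare_key_alt (text : String) (key : String) : Bool :=
  let ts : List Char := text.toList.filter (fun c => !PySem.Chars.isspace c)
  let ks : List Char := key.toList.filter (fun c => !PySem.Chars.isspace c)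
  PySem.Chars.startswith ts ks

-- ===== PRECONDITION & SPEC =====
-- Pre_ excludes exactly the inputs where A raises IndexError: those where the
-- whitespace-free text is a strict prefix of the whitespace-free key.
def Pre_compare_key (text : String) (key : String) : Prop :=
  ¬ (text.toList.filter (fun c => !PySem.Chars.isspace c) <+:
       key.toList.filter (fun c => !PySem.Chars.isspace c) ∧
     text.toList.filter (fun c => !PySem.Chars.isspace c) ≠
       key.toList.filter (fun c => !PySem.Chars.isspace c))
instance (text : String) (key : String) : Decidable (Pre_compare_key text key) := by
  unfold Pre_compare_key; infer_instance
def pvWitness_compare_key : String × String := ("abc def", " abc ")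

-- A raises IndexError exactly when the whitespace-free text is a strict prefix of the
-- whitespace-free key; B returns False there.
def Raises_compare_key (text : String) (key : String) : Prop :=
  text.toList.filter (fun c => !PySem.Chars.isspace c) <+:
    key.toList.filter (fun c => !PySem.Chars.isspace c) ∧
  text.toList.filter (fun c => !PySem.Chars.isspace c) ≠
    key.toList.filter (fun c => !PySem.Chars.isspace c)
instance (text : String) (key : String) : Decidable (Raises_compare_key text key) := by
  unfold Raises_compare_key; infer_instance
def pvRaiseWitness_compare_key : String × String := ("a", "ab")
def pvRaiseWitnessOut_compare_key : Bool := false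

def Spec_compare_key (text : String) (key : String) (out : Bool) : Prop := out = compare_key_alt text key
instance (text : String) (key : String) (out : Bool) : Decidable (Spec_compare_key text key out) := by unfold Spec_compare_key; infer_instance

-- ===== CLAIM (what is proved, stated in full; the proofs are below) =====
def Claim_equal_compare_key : Prop := ∀ (text : String) (key : String), Dom_compare_key text key → Pre_compare_key text key → Spec_compare_key text key (compare_key text key)
def Claim_raises_compare_key : Prop := (∀ (text : String) (key : String), Dom_compare_key text key → Raises_compare_key text key → ¬ Pre_compare_key text key) ∧ (Dom_compare_key (pvRaiseWitness_compare_key.1) (pvRaiseWitness_compare_key.2) ∧ Raises_compare_key (pvRaiseWitness_compare_key.1) (pvRaiseWitness_compare_key.2) ∧ compare_key_alt (pvRaiseWitness_compare_key.1) (pvRaiseWitness_compare_key.2) = pvRaiseWitnessOut_compare_key)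

-- ===== LEMMAS AND PROOFS =====

-- filtering out whitespace is unchanged by dropWhile isspace
theorem pv_rm_dropWhile (s : List Char) :
    (List.dropWhile PySem.Chars.isspace s).filter (fun c => !PySem.Chars.isspace c)
      = s.filter (fun c => !PySem.Chars.isspace c) := by
  induction s with
  | nil => rfl
  | cons c t ih =>
    by_cases h : PySem.Chars.isspace c = true <;>
      simp [h, ih]

theorem pv_rm_strip (s : List Char) :
    (PySem.Chars.strip s).filter (fun c => !PySem.Chars.isspace c)
      = s.filter (fun c => !PySem.Chars.isspace c) := by
  simp only [PySem.Chars.strip, PySem.Chars.rstrip, PySem.Chars.lstrip]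
  rw [List.filter_reverse, pv_rm_dropWhile, List.filter_reverse, List.reverse_reverse,
    pv_rm_dropWhile]

-- the head of a nonempty stripped string is not whitespace
theorem pv_strip_head_not_space (s : List Char) (c : Char) (r : List Char)
    (h : PySem.Chars.strip s = c :: r) : PySem.Chars.isspace c = false := by
  have hsuf : List.dropWhile PySem.Chars.isspace (PySem.Chars.lstrip s).reverse
      <:+ (PySem.Chars.lstrip s).reverse := List.dropWhile_suffix _
  have hpre : PySem.Chars.strip s <+: PySem.Chars.lstrip s := by
    simpa [PySem.Chars.strip, PySem.Chars.rstrip] using hsuf.reverse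
  rw [h] at hpre
  obtain ⟨u, hu⟩ := hpre
  have hu' : List.dropWhile PySem.Chars.isspace s = c :: (r ++ u) := by
    simpa [PySem.Chars.lstrip] using hu.symm
  have hne : List.dropWhile PySem.Chars.isspace s ≠ [] := by simp [hu']
  have hh := List.head_dropWhile_not PySem.Chars.isspace hne
  have hc : (List.dropWhile PySem.Chars.isspace s).head hne = c := by simp [hu']
  rwa [hc] at hh

theorem pv_rm_of_strip_cons (s : List Char) (c : Char) (r : List Char)
    (h : PySem.Chars.strip s = c :: r) :
    s.filter (fun x => !PySem.Chars.isspace x) = c :: r.filter (fun x => !PySem.Chars.isspace x) := by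
  have hc := pv_strip_head_not_space s c r h
  rw [← pv_rm_strip s, h, List.filter_cons]
  simp [hc]

theorem pv_main (k t : List Char)
    (hpre : ¬ (t.filter (fun c => !PySem.Chars.isspace c) <+: k.filter (fun c => !PySem.Chars.isspace c) ∧
               t.filter (fun c => !PySem.Chars.isspace c) ≠ k.filter (fun c => !PySem.Chars.isspace c))) :
    compareKeyAux t k
      = PySem.Chars.startswith (t.filter (fun c => !PySem.Chars.isspace c))
          (k.filter (fun c => !PySem.Chars.isspace c)) := by
  induction hn : k.length using Nat.strong_induction_on generalizing k t with
  | _ n ih =>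
  subst hn
  rw [compareKeyAux.eq_def]
  split
  next hk =>
    have hkrm : k.filter (fun c => !PySem.Chars.isspace c) = [] := by
      rw [← pv_rm_strip k, hk]; rfl
    simp [hkrm, PySem.Chars.startswith]
  next kc kr hk =>
    have hkrm := pv_rm_of_strip_cons k kc kr hk
    split
    next ht =>
      exfalso
      have htrm : t.filter (fun c => !PySem.Chars.isspace c) = [] := by
        rw [← pv_rm_strip t, ht]; rfl
      exact hpre ⟨by simp [htrm], by simp [htrm, hkrm]⟩
    next tc tr ht =>
      have htrm := pv_rm_of_strip_cons t tc tr ht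
      by_cases hne : kc = tc
      · subst hne
        rw [if_neg (fun hcon => hcon rfl)]
        have hlen : kr.length < k.length := by
          have h1 : (PySem.Chars.strip k).length ≤ k.length := by
            simp only [PySem.Chars.strip, PySem.Chars.rstrip, PySem.Chars.lstrip,
              List.length_reverse]
            calc (List.dropWhile PySem.Chars.isspace
                    (List.dropWhile PySem.Chars.isspace k).reverse).length
                ≤ (List.dropWhile PySem.Chars.isspace k).reverse.length :=
                  List.length_dropWhile_le _ _
              _ ≤ k.length := by simpa using List.length_dropWhile_le PySem.Chars.isspace k
          rw [hk] at h1; simp at h1; omega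
        have hpre' : ¬ (tr.filter (fun c => !PySem.Chars.isspace c) <+: kr.filter (fun c => !PySem.Chars.isspace c) ∧
            tr.filter (fun c => !PySem.Chars.isspace c) ≠ kr.filter (fun c => !PySem.Chars.isspace c)) := by
          intro ⟨hp, hq⟩
          exact hpre ⟨by rw [htrm, hkrm]; exact List.cons_prefix_cons.mpr ⟨rfl, hp⟩,
            by rw [htrm, hkrm]; simpa using hq⟩
        rw [ih kr.length hlen kr tr hpre' rfl]
        rw [htrm, hkrm]
        simp [PySem.Chars.startswith, List.isPrefixOf]
      · rw [if_pos hne, htrm, hkrm]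
        simp [PySem.Chars.startswith, List.isPrefixOf, hne]

-- ===== VERDICT (by name: the statement is the Claim_ definition above) =====
theorem compare_key_spec : Claim_equal_compare_key := by
  intro text key _ hpre
  unfold Spec_compare_key compare_key compare_key_alt
  exact pv_main key.toList text.toList hpre

theorem compare_key_raises : Claim_raises_compare_key := by
  unfold Claim_raises_compare_key
  exact ⟨fun text key _ hr hp => hp hr, by decide⟩

-- self-check: the raise witness really lies in Raises_ (uses compare_key_raises)
theorem compare_key_raises_witness_ok :
    Raises_compare_key (pvRaiseWitness_compare_key.1) (pvRaiseWitness_compare_key.2) :=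
  compare_key_raises.2.2.1
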